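-- pv_equiv track=rewrite | github.com/kknq/even-better-rym | scripts/vote_history_refresh.py | apply_actions
-- ===== SOURCE A (Python) =====
-- def apply_actions(actions):
--     entities = {}
--     for entity_id, action, name in actions:
--         if action in ("Add", "Update"):
--             entities[entity_id] = name
--         elif action in ("Delete", "Merge"):
--             entities.pop(entity_id, None)
--     return entities
-- ===== SOURCE B (Python) =====
-- def apply_actions(actions):
--     # index of the last Delete/Merge for each entity_id
--     last_removed = {}
--     for i, (entity_id, action, _name) in enumerate(actions):
--         if action in ("Delete", "Merge"):
--             last_removed[entity_id] = i
--     # keep only Add/Update actions that happen after the last removal of their id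
--     entities = {}
--     for i, (entity_id, action, name) in enumerate(actions):
--         if action in ("Add", "Update") and i > last_removed.get(entity_id, -1):
--             entities[entity_id] = name
--     return entities
-- ===== Notes on version B (the rewrite author's own statement) =====
-- stated objective: alternative
-- what changed: A mutates one dict forward (insert on Add/Update, pop on Delete/Merge); B never deletes: a first pass records the index of the last Delete/Merge per entity_id, and a second pass keeps exactly the Add/Update actions occurring after that index.
import Mathlib
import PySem

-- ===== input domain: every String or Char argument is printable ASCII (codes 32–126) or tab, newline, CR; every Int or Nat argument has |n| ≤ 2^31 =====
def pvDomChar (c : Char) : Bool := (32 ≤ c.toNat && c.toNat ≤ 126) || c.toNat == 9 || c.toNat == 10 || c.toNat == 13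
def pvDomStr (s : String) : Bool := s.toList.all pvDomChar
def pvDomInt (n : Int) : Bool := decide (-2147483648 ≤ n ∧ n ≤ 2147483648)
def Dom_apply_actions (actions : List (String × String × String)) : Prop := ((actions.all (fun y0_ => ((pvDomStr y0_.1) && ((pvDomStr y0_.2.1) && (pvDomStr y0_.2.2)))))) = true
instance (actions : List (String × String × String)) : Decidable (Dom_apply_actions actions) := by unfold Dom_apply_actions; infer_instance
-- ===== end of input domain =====

-- B replaces A's mutating forward pass (insert / pop on one dict) by two read-only passes:
-- first record the index of the last Delete/Merge per id, then keep exactly the Add/Update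
-- actions occurring after that index (objective: alternative decomposition, same cost).

-- ===== PORT A =====
-- loop body of A: Add/Update inserts, Delete/Merge pops, anything else is ignored
def pvStepA (d : PySem.Dict String String) (t : String × String × String) : PySem.Dict String String :=
  if t.2.1 = "Add" ∨ t.2.1 = "Update" then d.insert t.1 t.2.2
  else if t.2.1 = "Delete" ∨ t.2.1 = "Merge" then d.erase t.1
  else d

def apply_actions (actions : List (String × String × String)) : List (String × String) :=
  (actions.foldl pvStepA PySem.Dict.empty).items

-- ===== PORT B =====
-- first pass of B: last_removed[entity_id] = i for Delete/Merge actions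
def pvStepDel (d : PySem.Dict String Int) (p : Int × String × String × String) : PySem.Dict String Int :=
  if p.2.2.1 = "Delete" ∨ p.2.2.1 = "Merge" then d.insert p.2.1 p.1 else d

-- second pass of B: keep Add/Update with i > last_removed.get(entity_id, -1)
def pvStepIns (ld : PySem.Dict String Int) (d : PySem.Dict String String)
    (p : Int × String × String × String) : PySem.Dict String String :=
  if (p.2.2.1 = "Add" ∨ p.2.2.1 = "Update") ∧ ld.getD p.2.1 (-1) < p.1
  then d.insert p.2.1 p.2.2.2 else d

def apply_actions_alt (actions : List (String × String × String)) : List (String × String) :=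
  let ld := (PySem.List.enumerate actions).foldl pvStepDel PySem.Dict.empty
  ((PySem.List.enumerate actions).foldl (pvStepIns ld) PySem.Dict.empty).items

-- ===== PRECONDITION & SPEC =====
def Spec_apply_actions (actions : List (String × String × String)) (out : List (String × String)) : Prop := out = apply_actions_alt actions
instance (actions : List (String × String × String)) (out : List (String × String)) : Decidable (Spec_apply_actions actions out) := by unfold Spec_apply_actions; infer_instance

-- ===== CLAIM (what is proved, stated in full; the proofs are below) =====
def Claim_equal_apply_actions : Prop := ∀ (actions : List (String × String × String)), Dom_apply_actions actions → Spec_apply_actions actions (apply_actions actions)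

-- ===== LEMMAS AND PROOFS =====

-- abbreviations for the two passes of B (proof-side only)
def pvLd (xs : List (String × String × String)) : PySem.Dict String Int :=
  (PySem.List.enumerate xs).foldl pvStepDel PySem.Dict.empty

def pvB (ld : PySem.Dict String Int) (L : List (Int × String × String × String)) : PySem.Dict String String :=
  L.foldl (pvStepIns ld) PySem.Dict.empty

-- small Dict facts about erase
theorem pv_erase_empty {ν : Type} (e : String) :
    (PySem.Dict.empty : PySem.Dict String ν).erase e = PySem.Dict.empty := rfl

theorem pv_filter_map_self {ν : Type} (e : String) (v : ν) (l : List (String × ν)) :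
    (l.map (fun p => if p.1 == e then (e, v) else p)).filter (fun p => !(p.1 == e))
      = l.filter (fun p => !(p.1 == e)) := by
  induction l with
  | nil => rfl
  | cons q l ih =>
    by_cases h : q.1 = e <;> (simp only [beq_iff_eq] at ih ⊢; simp [h, ih])

theorem pv_erase_insert_self {ν : Type} (d : PySem.Dict String ν) (e : String) (v : ν) :
    (d.insert e v).erase e = d.erase e := by
  apply PySem.Dict.ext
  by_cases h : d.contains e <;>
    simp only [PySem.Dict.insert, PySem.Dict.erase, h, if_true, if_false,
      Bool.false_eq_true, pv_filter_map_self, List.filter_append]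
  simp

theorem pv_any_filter {ν : Type} (k e : String) (h : k ≠ e) (l : List (String × ν)) :
    (l.filter (fun p => !(p.1 == e))).any (fun p => p.1 == k) = l.any (fun p => p.1 == k) := by
  induction l with
  | nil => rfl
  | cons q l ih =>
    by_cases hq : q.1 = e
    · have hb : (q.1 == e) = true := beq_iff_eq.mpr hq
      simp [ih, hq, Ne.symm h]
    · have hb : (q.1 == e) = false := beq_eq_false_iff_ne.mpr hq
      simp [hb, ih]

theorem pv_erase_insert_of_ne {ν : Type} (d : PySem.Dict String ν) (k e : String) (v : ν)
    (h : k ≠ e) : (d.insert k v).erase e = (d.erase e).insert k v := by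
  apply PySem.Dict.ext
  simp only [PySem.Dict.insert, PySem.Dict.erase, PySem.Dict.contains]
  rw [pv_any_filter k e h d.items]
  by_cases hd : d.items.any (fun p => p.1 == k)
  · simp only [hd, if_true]
    rw [List.filter_map]
    congr 1
    apply List.filter_congr
    intro q _
    by_cases hq : q.1 = k <;> simp [hq]
  · simp only [Bool.not_eq_true] at hd
    simp only [hd, Bool.false_eq_true, if_false, List.filter_append]
    simp [h]

-- getD through one step of B's first pass
theorem pv_stepDel_getD (d : PySem.Dict String Int) (p : Int × String × String × String) (e : String) :
    (pvStepDel d p).getD e (-1)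
      = if (p.2.2.1 = "Delete" ∨ p.2.2.1 = "Merge") ∧ e = p.2.1 then p.1 else d.getD e (-1) := by
  by_cases h1 : (p.2.2.1 = "Delete" ∨ p.2.2.1 = "Merge") <;> by_cases h2 : e = p.2.1 <;>
    simp [pvStepDel, h1, h2, PySem.Dict.getD_insert]

-- every recorded last-removal index is < the length of the list scanned so far
theorem pv_ld_bound (xs : List (String × String × String)) (e : String) :
    (pvLd xs).getD e (-1) < (xs.length : Int) := by
  induction xs using List.reverseRecOn with
  | nil => simp [pvLd, PySem.List.enumerate_nil, PySem.Dict.getD_empty]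
  | append_singleton xs x ih =>
    unfold pvLd at *
    rw [PySem.List.enumerate_append, List.foldl_append]
    simp only [PySem.List.enumerate_cons, PySem.List.enumerate_nil, List.foldl_cons, List.foldl_nil]
    rw [pv_stepDel_getD]
    simp only [List.length_append, List.length_cons, List.length_nil, Nat.cast_add, Nat.cast_one]
    split_ifs with h
    · omega
    · omega

-- second pass with last_removed[e] set to N ≥ all indices of L = erasing e from the plain second pass
theorem pv_fold_ins_erase (ld : PySem.Dict String Int) (e : String) (N : Int)
    (L : List (Int × String × String × String)) (hL : ∀ p ∈ L, p.1 < N)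
    (d : PySem.Dict String String) :
    L.foldl (pvStepIns (ld.insert e N)) (d.erase e) = (L.foldl (pvStepIns ld) d).erase e := by
  induction L generalizing d with
  | nil => rfl
  | cons p L ih =>
    simp only [List.foldl_cons]
    have h1 : pvStepIns (ld.insert e N) (d.erase e) p = (pvStepIns ld d p).erase e := by
      obtain ⟨i, id, act, nm⟩ := p
      unfold pvStepIns
      by_cases hid : id = e
      · subst hid
        have hiN : i < N := hL _ (List.mem_cons_self)
        simp only [PySem.Dict.getD_insert_self]
        have hc : ¬((act = "Add" ∨ act = "Update") ∧ N < i) := fun c => absurd c.2 (by omega)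
        rw [if_neg hc]
        split_ifs with c2
        · exact (pv_erase_insert_self d id nm).symm
        · rfl
      · rw [show ((ld.insert e N).getD id (-1)) = ld.getD id (-1) from by
          rw [PySem.Dict.getD_insert]; simp [hid]]
        split_ifs with c
        · exact (pv_erase_insert_of_ne d id e nm hid).symm
        · rfl
    rw [h1]
    exact ih (fun q hq => hL q (List.mem_cons_of_mem _ hq)) _

-- the heart: the two dicts agree (snoc induction)
theorem pv_main (xs : List (String × String × String)) :
    xs.foldl pvStepA PySem.Dict.empty = pvB (pvLd xs) (PySem.List.enumerate xs) := by
  induction xs using List.reverseRecOn with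
  | nil => rfl
  | append_singleton xs x ih =>
    obtain ⟨id, act, nm⟩ := x
    unfold pvB pvLd at *
    rw [PySem.List.enumerate_append]
    simp only [List.foldl_append, PySem.List.enumerate_cons, PySem.List.enumerate_nil,
      List.foldl_cons, List.foldl_nil]
    set D := List.foldl pvStepDel PySem.Dict.empty (PySem.List.enumerate xs) with hDdef
    have hb := pv_ld_bound xs id
    unfold pvLd at hb
    rw [← hDdef] at hb
    by_cases hA : act = "Add" ∨ act = "Update"
    · have hld : pvStepDel D ((0 : Int) + (xs.length : Int), id, act, nm) = D := by
        rcases hA with rfl | rfl <;> simp [pvStepDel]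
      rw [hld]
      rcases hA with rfl | rfl <;> simp [pvStepA, pvStepIns, ih, hb]
    · by_cases hD : act = "Delete" ∨ act = "Merge"
      · have hbound : ∀ p ∈ PySem.List.enumerate xs, p.1 < (0 : Int) + (xs.length : Int) := by
          intro p hp
          rw [PySem.List.mem_enumerate_iff] at hp
          obtain ⟨k, hk, rfl⟩ := hp
          simp
          omega
        have hld : pvStepDel D ((0 : Int) + (xs.length : Int), id, act, nm)
            = D.insert id ((0 : Int) + (xs.length : Int)) := by
          rcases hD with rfl | rfl <;> simp [pvStepDel]
        rw [hld]
        have hfold := pv_fold_ins_erase D id ((0 : Int) + (xs.length : Int))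
          (PySem.List.enumerate xs) hbound PySem.Dict.empty
        rw [pv_erase_empty] at hfold
        simp only [zero_add] at hfold
        rcases hD with rfl | rfl <;> simp [pvStepA, pvStepIns, ih, hfold]
      · rw [not_or] at hA hD
        have hld : pvStepDel D ((0 : Int) + (xs.length : Int), id, act, nm) = D := by
          simp [pvStepDel, hD.1, hD.2]
        rw [hld]
        simp [pvStepA, pvStepIns, hA.1, hA.2, hD.1, hD.2, ih]

-- ===== VERDICT (by name: the statement is the Claim_ definition above) =====
theorem apply_actions_spec : Claim_equal_apply_actions := by
  intro actions _
  unfold Spec_apply_actions apply_actions apply_actions_alt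
  rw [pv_main actions]
  rfl
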